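-- pv_equiv track=rewrite | github.com/fspv/learning | l33tcode/camelcase-matching.py | check
-- ===== SOURCE A (Python) =====
-- def check(query, pattern):
--     pattern_pos = 0
--
--     for q in query:
--         if pattern_pos < len(pattern) and q == pattern[pattern_pos]:
--             pattern_pos += 1
--         else:
--             if q.upper() == q:
--                 return False
--
--     return pattern_pos == len(pattern)
-- ===== SOURCE B (Python) =====
-- def check(query, pattern):
--     # Bit-parallel right-to-left DP: bit j of dp says "pattern[j:] matches the
--     # query suffix processed so far"; occ[c] has bit j set where pattern[j] == c.
--     m = len(pattern)
--     occ = {}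
--     for j, c in enumerate(pattern):
--         occ[c] = occ.get(c, 0) | (1 << j)
--     dp = 1 << m
--     for q in reversed(query):
--         take = occ.get(q, 0) & (dp >> 1)
--         dp = take | dp if 'a' <= q <= 'z' else take
--     return dp & 1 == 1
-- ===== Notes on version B (the rewrite author's own statement) =====
-- stated objective: alternative
-- what changed: Replaces A's greedy single-pass two-pointer scan with a bit-parallel right-to-left dynamic programming: a per-character occurrence bitmask over pattern positions is precomputed, and one dp bitmask (bit j = 'pattern[j:] matches the processed query suffix') is updated with shift/and/or per query character; the proof shows the greedy choice loses nothing, so both equal the full backtracking match.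
import Mathlib
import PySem

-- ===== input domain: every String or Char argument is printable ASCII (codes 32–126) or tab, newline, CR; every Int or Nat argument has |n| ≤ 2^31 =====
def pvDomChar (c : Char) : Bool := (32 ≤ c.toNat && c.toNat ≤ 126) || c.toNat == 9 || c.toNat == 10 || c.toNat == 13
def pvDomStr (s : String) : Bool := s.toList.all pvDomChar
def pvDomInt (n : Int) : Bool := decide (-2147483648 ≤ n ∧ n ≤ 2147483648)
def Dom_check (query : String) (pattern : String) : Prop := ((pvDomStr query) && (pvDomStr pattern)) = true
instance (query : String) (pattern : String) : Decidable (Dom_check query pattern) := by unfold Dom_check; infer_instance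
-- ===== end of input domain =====

-- B replaces A's greedy one-pass pointer scan with a right-to-left dynamic-programming table
-- over pattern positions (objective: alternative algorithm, same results, not faster).


-- ===== PORT A =====
-- the for-loop over query with early `return False`, as structural recursion on the
-- remaining query chars and the running pattern_pos; `q.upper() == q` on a one-char
-- string is `PySem.Chars.upperChar q == q` on its char (exact on ASCII).
def checkGo (ps : List Char) : List Char → Nat → Bool
  | [], pos => pos == ps.length
  | q :: qs, pos =>
    if pos < ps.length && (ps[pos]? == some q) then
      checkGo ps qs (pos + 1)
    else
      if PySem.Chars.upperChar q == q then false
      else checkGo ps qs pos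

def check (query : String) (pattern : String) : Bool :=
  checkGo pattern.toList query.toList 0

-- ===== PORT B =====
-- Source B: bit-parallel right-to-left DP; occ[c] has bit j set where pattern[j] == c,
-- bit j of dp says "pattern[j:] matches the query suffix processed so far".
-- Python's unbounded nonnegative int masks are Nat here; enumerate's Int index
-- is made a Nat shift amount with .toNat (exact: indices start at 0).
def check_alt (query : String) (pattern : String) : Bool :=
  let ps := pattern.toList
  let m := ps.length
  let occ := (PySem.List.enumerate ps 0).foldl
    (fun d jc => d.insert jc.2 ((d.getD jc.2 0) ||| (1 <<< jc.1.toNat)))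
    PySem.Dict.empty
  let dp := query.toList.reverse.foldl (fun dp q =>
    let take := (occ.getD q 0) &&& (dp >>> 1)
    if 'a' ≤ q ∧ q ≤ 'z' then take ||| dp else take) (1 <<< m)
  dp &&& 1 == 1

-- ===== PRECONDITION & SPEC =====
def Spec_check (query : String) (pattern : String) (out : Bool) : Prop := out = check_alt query pattern
instance (query : String) (pattern : String) (out : Bool) : Decidable (Spec_check query pattern out) := by unfold Spec_check; infer_instance

-- ===== CLAIM (what is proved, stated in full; the proofs are below) =====
def Claim_equal_check : Prop := ∀ (query : String) (pattern : String), Dom_check query pattern → Spec_check query pattern (check query pattern)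

-- ===== LEMMAS AND PROOFS =====

-- reference semantics: full backtracking match of pattern against query
-- (lowercase chars may be skipped); both ports are proved equal to it.
def M : List Char → List Char → Bool
  | [], ps => ps.isEmpty
  | q :: qs, ps =>
    (match ps with
     | p :: ps' => (q == p) && M qs ps'
     | [] => false)
    || (PySem.Chars.islower q && M qs ps)

theorem upperChar_beq_eq (q : Char) :
    (PySem.Chars.upperChar q == q) = !PySem.Chars.islower q := by
  unfold PySem.Chars.upperChar PySem.Chars.islower
  by_cases h : ('a' ≤ q ∧ q ≤ 'z')
  · obtain ⟨h1, h2⟩ := h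
    have ha : 97 ≤ q.toNat := h1
    have hb : q.toNat ≤ 122 := h2
    have hval : (q.toNat - 32).isValidChar := by left; omega
    have hv : (Char.ofNat (q.toNat - 32)).toNat = q.toNat - 32 := by
      rw [Char.toNat_ofNat, if_pos hval]
    have hne : Char.ofNat (q.toNat - 32) ≠ q := by
      intro he; rw [he] at hv; omega
    simp only [decide_eq_true h1, decide_eq_true h2, Bool.and_self, if_true]
    simpa using hne
  · have hb : (decide ('a' ≤ q) && decide (q ≤ 'z')) = false := by
      rw [Bool.and_eq_false_iff]
      rcases not_and_or.mp h with h' | h'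
      · left; simpa using h'
      · right; simpa using h'
    simp [hb]

theorem M_exchange (p : Char) (hp : PySem.Chars.islower p = true) :
    ∀ (qs ps : List Char), M qs (p :: ps) = true → M qs ps = true := by
  intro qs
  induction qs with
  | nil => intro ps h; simp [M] at h
  | cons q qs ih =>
    intro ps h
    simp only [M, Bool.or_eq_true, Bool.and_eq_true, beq_iff_eq] at h ⊢
    rcases h with ⟨hqp, hm⟩ | ⟨hl, hm⟩
    · subst hqp
      right
      exact ⟨hp, hm⟩
    · right
      exact ⟨hl, ih ps hm⟩

theorem checkGo_eq_M (ps : List Char) :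
    ∀ (qs : List Char) (pos : Nat), pos ≤ ps.length →
      checkGo ps qs pos = M qs (ps.drop pos) := by
  intro qs
  induction qs with
  | nil =>
    intro pos hpos
    simp only [checkGo, M]
    rw [Bool.eq_iff_iff]
    simp only [beq_iff_eq, List.isEmpty_iff, List.drop_eq_nil_iff]
    omega
  | cons q qs ih =>
    intro pos hpos
    simp only [checkGo]
    by_cases hc : (pos < ps.length && (ps[pos]? == some q)) = true
    · rw [if_pos hc]
      obtain ⟨hlt, heq⟩ := Bool.and_eq_true_iff.mp hc
      have hlt : pos < ps.length := by simpa using hlt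
      have hpq : ps[pos] = q := by
        rw [List.getElem?_eq_getElem hlt] at heq
        simpa using heq
      have hdrop : ps.drop pos = q :: ps.drop (pos + 1) := by
        rw [List.drop_eq_getElem_cons hlt, hpq]
      rw [ih (pos + 1) hlt, hdrop]
      simp only [M, beq_self_eq_true, Bool.true_and]
      by_cases hm : M qs (ps.drop (pos + 1)) = true
      · simp [hm]
      · simp only [hm]
        rw [Bool.false_or]
        by_cases hl : PySem.Chars.islower q = true
        · have : M qs (q :: ps.drop (pos + 1)) ≠ true := by
            intro hcon
            exact hm (M_exchange q hl qs _ hcon)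
          simp [hl, Bool.eq_false_iff.mpr this]
        · simp [Bool.eq_false_iff.mpr hl]
    · rw [if_neg hc, upperChar_beq_eq]
      rcases Nat.lt_or_ge pos ps.length with hlt | hge
      · have hne : (ps[pos]? == some q) = false := by
          rcases Bool.and_eq_false_iff.mp (Bool.eq_false_iff.mpr hc) with h | h
          · exact absurd hlt (by simpa using h)
          · exact h
        have hdrop : ps.drop pos = ps[pos] :: ps.drop (pos + 1) :=
          List.drop_eq_getElem_cons hlt
        have hqp : (q == ps[pos]) = false := by
          rw [List.getElem?_eq_getElem hlt] at hne
          have h' : ¬ ps[pos] = q := by simpa using hne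
          simp only [beq_eq_false_iff_ne, ne_eq]
          exact fun e => h' e.symm
        rw [ih pos hpos, hdrop]
        simp only [M, hqp, Bool.false_and, Bool.false_or]
        by_cases hl : PySem.Chars.islower q = true
        · rw [← hdrop]; simp [hl]
        · simp [Bool.eq_false_iff.mpr hl]
      · have hdrop : ps.drop pos = [] := List.drop_eq_nil_iff.mpr hge
        have hplen : pos = ps.length := le_antisymm hpos hge
        rw [ih pos hpos, hdrop]
        simp only [M]
        by_cases hl : PySem.Chars.islower q = true
        · simp [hl]
        · simp [Bool.eq_false_iff.mpr hl]

theorem beq_char_comm (a b : Char) : (a == b) = (b == a) := by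
  by_cases h : a = b
  · rw [h]
  · have h2 : ¬ b = a := fun e => h e.symm
    simp [h, h2]

theorem testBit_one' (i : Nat) : Nat.testBit 1 i = decide (i = 0) := by
  cases i with
  | zero => decide
  | succ n => simp [Nat.testBit_succ]

theorem and_one_eq (x : Nat) : (x &&& 1 == 1) = x.testBit 0 := by
  rw [Nat.and_one_is_mod]
  simp only [Nat.testBit_zero]
  rw [Bool.eq_iff_iff]
  simp

theorem occ_getD_testBit : ∀ (ps : List Char) (s : Nat) (d : PySem.Dict Char Nat) (q : Char) (k : Nat),
    (((PySem.List.enumerate ps (s : Int)).foldl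
        (fun d jc => d.insert jc.2 ((d.getD jc.2 0) ||| (1 <<< jc.1.toNat))) d).getD q 0).testBit k
      = ((d.getD q 0).testBit k || (decide (s ≤ k) && (ps[k - s]? == some q))) := by
  intro ps
  induction ps with
  | nil => intro s d q k; simp [PySem.List.enumerate]
  | cons c ps ih =>
    intro s d q k
    rw [PySem.List.enumerate_cons]
    rw [List.foldl_cons]
    have hcast : ((s : Int) + 1) = ((s + 1 : Nat) : Int) := by push_cast; ring
    rw [hcast, ih (s + 1)]
    have hins : ((d.insert c ((d.getD c 0) ||| (1 <<< (s : Int).toNat))).getD q 0)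
        = if q = c then (d.getD c 0) ||| (1 <<< s) else d.getD q 0 := by
      rw [PySem.Dict.getD_insert]
      simp
    rw [hins]
    by_cases hqc : q = c
    · subst hqc
      rw [if_pos rfl]
      simp only [Nat.testBit_or, Nat.testBit_shiftLeft, testBit_one']
      rcases Nat.lt_trichotomy k s with h | h | h
      · have h1 : ¬ s ≤ k := by omega
        have h2 : ¬ s + 1 ≤ k := by omega
        simp [h1, h2]
      · subst h
        have h2 : ¬ k + 1 ≤ k := by omega
        simp [h2]
      · have h1 : s ≤ k := by omega
        have h2 : s + 1 ≤ k := by omega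
        have h3 : ¬ (k - s = 0) := by omega
        have h4 : k - s = (k - (s+1)) + 1 := by omega
        simp only [decide_eq_true h1, decide_eq_true h2, Bool.true_and, h4,
          List.getElem?_cons_succ]
        simp
    · rw [if_neg hqc]
      rcases Nat.lt_trichotomy k s with h | h | h
      · have h1 : ¬ s ≤ k := by omega
        have h2 : ¬ s + 1 ≤ k := by omega
        simp [h1, h2]
      · subst h
        have h2 : ¬ k + 1 ≤ k := by omega
        have hf : ((some c : Option Char) == some q) = false := by
          simp only [beq_eq_false_iff_ne, ne_eq, Option.some.injEq]
          exact fun e => hqc e.symm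
        simp only [decide_eq_false h2, Bool.false_and, Bool.or_false, Nat.sub_self,
          List.getElem?_cons_zero, hf, le_refl, decide_eq_true_eq, decide_true, Bool.true_and]
      · have h1 : s ≤ k := by omega
        have h2 : s + 1 ≤ k := by omega
        have h4 : k - s = (k - (s+1)) + 1 := by omega
        simp only [decide_eq_true h1, decide_eq_true h2, Bool.true_and, h4,
          List.getElem?_cons_succ]

theorem dp_bit (ps : List Char) (occ : PySem.Dict Char Nat)
    (hocc : ∀ (q : Char) (k : Nat), ((occ.getD q 0).testBit k) = (ps[k]? == some q)) :
    ∀ (qs : List Char) (k : Nat),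
      (List.foldr (fun q dp =>
          let take := (occ.getD q 0) &&& (dp >>> 1)
          if 'a' ≤ q ∧ q ≤ 'z' then take ||| dp else take)
        (1 <<< ps.length) qs).testBit k
      = (decide (k ≤ ps.length) && M qs (ps.drop k)) := by
  intro qs
  induction qs with
  | nil =>
    intro k
    simp only [List.foldr_nil, Nat.testBit_shiftLeft, testBit_one', M]
    rcases Nat.lt_trichotomy k ps.length with h | h | h
    · have h1 : (decide (ps.length ≤ k)) = false := by
        simp only [decide_eq_false_iff_not]; omega
      have h2 : (List.drop k ps).isEmpty = false := by
        simp only [List.isEmpty_eq_false_iff, ne_eq, List.drop_eq_nil_iff]; omega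
      simp [h1, h2]
    · subst h
      simp [Nat.sub_self]
    · have h1 : ¬ k ≤ ps.length := by omega
      have h2 : ¬ (k - ps.length = 0) := by omega
      simp [h1, h2]
  | cons q qs ih =>
    intro k
    simp only [List.foldr_cons]
    have hlow : PySem.Chars.islower q = (decide ('a' ≤ q) && decide (q ≤ 'z')) := rfl
    by_cases hl : ('a' ≤ q ∧ q ≤ 'z')
    · rw [if_pos hl]
      have hlo : PySem.Chars.islower q = true := by
        rw [hlow, decide_eq_true hl.1, decide_eq_true hl.2, Bool.and_self]
      simp only [Nat.testBit_or, Nat.testBit_and, Nat.testBit_shiftRight, hocc, ih,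
        M, hlo, Bool.true_and]
      rcases Nat.lt_trichotomy k ps.length with h | h | h
      · have e1 : ps[k]? = some ps[k] := List.getElem?_eq_getElem h
        have e2 : (1 + k ≤ ps.length) := by omega
        have e3 : (k ≤ ps.length) := by omega
        have e4 : 1 + k = k + 1 := by omega
        rw [e1, e4, decide_eq_true (by omega : k + 1 ≤ ps.length), decide_eq_true e3,
          List.drop_eq_getElem_cons h]
        have e5 : ((some ps[k] : Option Char) == some q) = (q == ps[k]) := by
          rw [beq_char_comm]; simp
        rw [e5]
        simp only [Bool.true_and]
      · subst h
        have e1 : ps[ps.length]? = none := by simp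
        rw [e1, List.drop_length]
        simp
      · have e1 : ps[k]? = none := by simp; omega
        have e2 : (decide (k ≤ ps.length)) = false := by simp; omega
        rw [e1, e2]
        simp
    · rw [if_neg hl]
      have hlo : PySem.Chars.islower q = false := by
        rw [hlow, Bool.and_eq_false_iff]
        rcases not_and_or.mp hl with h' | h'
        · left; simpa using h'
        · right; simpa using h'
      simp only [Nat.testBit_and, Nat.testBit_shiftRight, hocc, ih, M, hlo,
        Bool.false_and, Bool.or_false]
      rcases Nat.lt_trichotomy k ps.length with h | h | h
      · have e1 : ps[k]? = some ps[k] := List.getElem?_eq_getElem h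
        have e4 : 1 + k = k + 1 := by omega
        rw [e1, e4, decide_eq_true (by omega : k + 1 ≤ ps.length),
          decide_eq_true (by omega : k ≤ ps.length), List.drop_eq_getElem_cons h]
        have e5 : ((some ps[k] : Option Char) == some q) = (q == ps[k]) := by
          rw [beq_char_comm]; simp
        rw [e5]
        simp
      · subst h
        have e1 : ps[ps.length]? = none := by simp
        rw [e1, List.drop_length]
        simp
      · have e1 : ps[k]? = none := by simp; omega
        have e2 : (decide (k ≤ ps.length)) = false := by simp; omega
        rw [e1, e2]
        simp

-- ===== VERDICT (by name: the statement is the Claim_ definition above) =====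
theorem check_spec : Claim_equal_check := by
  intro query pattern _
  show check query pattern = check_alt query pattern
  unfold check check_alt
  simp only [List.foldl_reverse]
  rw [checkGo_eq_M _ _ 0 (Nat.zero_le _)]
  have hocc : ∀ (q : Char) (k : Nat),
      ((((PySem.List.enumerate pattern.toList 0).foldl
          (fun (d : PySem.Dict Char Nat) (jc : Int × Char) =>
            PySem.Dict.insert d jc.2 ((PySem.Dict.getD d jc.2 0) ||| (1 <<< jc.1.toNat)))
          (PySem.Dict.empty : PySem.Dict Char Nat)).getD q 0).testBit k)
        = (pattern.toList[k]? == some q) := by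
    intro q k
    have h := occ_getD_testBit pattern.toList 0 PySem.Dict.empty q k
    simpa using h
  rw [and_one_eq, dp_bit pattern.toList _ hocc query.toList 0]
  simp
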